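-- pv_equiv track=rewrite | github.com/sigzug/Billettkontroll-AI | training/utils/recursive_utils.py | recursive_line_creator
-- ===== SOURCE A (Python) =====
-- def recursive_line_creator(data: dict, line: list[dict], checked_stop: int, first_stop: int, last_stop: int) -> dict:
--     """Recursive function that creates a line from a given stop to another given stop."""
--     if first_stop == last_stop:
--         return data
--
--     if first_stop <= checked_stop < last_stop:
--         for key, value in data.items():
--             if key == "Sjekket?":
--                 value.append("ja")
--             elif key == "Fra":
--                 value.append(line[first_stop]["name"])
--             elif key == "Til":
--                 value.append(line[last_stop]["name"])
--             else:
--                 value.append(value[0])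
--     elif first_stop <= checked_stop and last_stop <= checked_stop:
--         for key, value in data.items():
--             if key == "Fra":
--                 value.append(line[first_stop]["name"])
--             elif key == "Til":
--                 value.append(line[last_stop]["name"])
--             elif key == "Sjekket?":
--                 value.append("nei")
--             else:
--                 value.append(value[0])
--
--     data.update(recursive_line_creator(data, line, checked_stop, first_stop + 1, last_stop))
--     data.update(recursive_line_creator(data, line, checked_stop, first_stop, last_stop - 1))
--
--     return data
-- ===== SOURCE B (Python) =====
-- def recursive_line_creator(data: dict, line: list[dict], checked_stop: int, first_stop: int, last_stop: int) -> dict: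
--     """Iterative version: an explicit LIFO stack replaces the double recursion,
--     visiting (first, last) pairs in the same pre-order and appending identically."""
--     stack = [(first_stop, last_stop)]
--     while stack:
--         first, last = stack.pop()
--         if first == last:
--             continue
--         if first <= checked_stop < last:
--             for key, value in data.items():
--                 if key == "Sjekket?":
--                     value.append("ja")
--                 elif key == "Fra":
--                     value.append(line[first]["name"])
--                 elif key == "Til":
--                     value.append(line[last]["name"])
--                 else:
--                     value.append(value[0])
--         elif first <= checked_stop and last <= checked_stop:
--             for key, value in data.items():
--                 if key == "Fra":
--                     value.append(line[first]["name"])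
--                 elif key == "Til":
--                     value.append(line[last]["name"])
--                 elif key == "Sjekket?":
--                     value.append("nei")
--                 else:
--                     value.append(value[0])
--         stack.append((first, last - 1))
--         stack.append((first + 1, last))
--     return data
-- ===== Notes on version B (the rewrite author's own statement) =====
-- stated objective: alternative
-- what changed: The double self-recursion (pre-order over (first,last) pairs with data.update of its own result) is replaced by an iterative worklist: an explicit LIFO stack of (first,last) pairs, pushing (first,last-1) then (first+1,last) so pops reproduce the original pre-order append sequence.
import Mathlib
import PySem

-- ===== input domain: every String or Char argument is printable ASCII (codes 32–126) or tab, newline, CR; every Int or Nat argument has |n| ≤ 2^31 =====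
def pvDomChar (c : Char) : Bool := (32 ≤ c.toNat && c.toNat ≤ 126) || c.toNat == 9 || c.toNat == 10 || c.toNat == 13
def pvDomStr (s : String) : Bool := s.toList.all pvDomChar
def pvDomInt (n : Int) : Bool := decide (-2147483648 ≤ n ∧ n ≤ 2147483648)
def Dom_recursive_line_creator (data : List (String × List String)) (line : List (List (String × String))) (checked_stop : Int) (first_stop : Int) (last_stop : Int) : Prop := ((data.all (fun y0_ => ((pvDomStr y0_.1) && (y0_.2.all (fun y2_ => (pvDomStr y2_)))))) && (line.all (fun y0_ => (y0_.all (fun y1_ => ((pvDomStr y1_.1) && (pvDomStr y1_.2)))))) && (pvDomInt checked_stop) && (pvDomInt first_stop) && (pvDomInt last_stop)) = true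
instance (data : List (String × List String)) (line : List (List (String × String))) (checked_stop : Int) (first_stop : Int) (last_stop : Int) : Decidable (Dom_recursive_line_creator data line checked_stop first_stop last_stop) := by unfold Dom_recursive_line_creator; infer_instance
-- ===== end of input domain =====

-- B replaces the double recursion by an explicit LIFO stack visiting the same (first,last)
-- pairs in the same pre-order (objective: alternative decomposition, same cost).
-- Both Pythons mutate `data` in place identically and return it; the theorems are about the
-- returned value.

-- ===== PORT A =====
-- line[i]["name"]: Python indexing (negative wraps) then dict lookup; total via getD,
-- exact wherever Pre_ holds (Pre_ guarantees the index is in range and "name" is present).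
def pvRowName (line : List (List (String × String))) (i : Int) : String :=
  (PySem.Dict.get? (PySem.Dict.mk ((PySem.List.pyGet? line i).getD [])) "name").getD ""

-- the body of the two identical for-loops over data.items() (same source text in A and B);
-- value[0] is total via getD, exact under Pre_ (those lists are nonempty).
def pvAppendRow (line : List (List (String × String))) (checked_stop first_stop last_stop : Int)
    (data : List (String × List String)) : List (String × List String) :=
  if first_stop ≤ checked_stop ∧ checked_stop < last_stop then
    data.map (fun kv => (kv.1, kv.2 ++
      [if kv.1 = "Sjekket?" then "ja"
       else if kv.1 = "Fra" then pvRowName line first_stop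
       else if kv.1 = "Til" then pvRowName line last_stop
       else (PySem.List.pyGet? kv.2 0).getD ""]))
  else if first_stop ≤ checked_stop ∧ last_stop ≤ checked_stop then
    data.map (fun kv => (kv.1, kv.2 ++
      [if kv.1 = "Fra" then pvRowName line first_stop
       else if kv.1 = "Til" then pvRowName line last_stop
       else if kv.1 = "Sjekket?" then "nei"
       else (PySem.List.pyGet? kv.2 0).getD ""]))
  else data

-- data.update(recursive_line_creator(data, …)) updates data with itself (the callee returns the
-- very same mutated dict), so functionally each call just threads the dict through.
def recursive_line_creator (data : List (String × List String)) (line : List (List (String × String))) (checked_stop : Int) (first_stop : Int) (last_stop : Int) : List (String × List String) :=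
  if first_stop = last_stop then data
  else if last_stop < first_stop then data
    -- guard for totality only: Python recurses forever here (never returns); excluded by Pre_
  else
    let d1 := pvAppendRow line checked_stop first_stop last_stop data
    let d2 := recursive_line_creator d1 line checked_stop (first_stop + 1) last_stop
    recursive_line_creator d2 line checked_stop first_stop (last_stop - 1)
termination_by (last_stop - first_stop).toNat
decreasing_by all_goals omega

-- ===== PORT B =====
def pvStackMeasure : List (Int × Int) → Nat
  | [] => 0
  | (f, l) :: rest => 3 ^ (l - f).toNat + pvStackMeasure rest

def pvLoop (line : List (List (String × String))) (checked_stop : Int)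
    (data : List (String × List String)) : List (Int × Int) → List (String × List String)
  | [] => data
  | (first, last) :: rest =>
    if first = last then pvLoop line checked_stop data rest
    else if last < first then pvLoop line checked_stop data rest
      -- guard for totality only: Python's loop never terminates from such a pair; excluded by Pre_
    else pvLoop line checked_stop (pvAppendRow line checked_stop first last data)
        ((first + 1, last) :: (first, last - 1) :: rest)
termination_by stack => pvStackMeasure stack
decreasing_by
  · simp only [pvStackMeasure]
    have := Nat.pow_pos (n := (last - first).toNat) (show 0 < 3 by norm_num)
    omega
  · simp only [pvStackMeasure]
    have := Nat.pow_pos (n := (last - first).toNat) (show 0 < 3 by norm_num)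
    omega
  · simp only [pvStackMeasure]
    have h1 : (last - (first + 1)).toNat = (last - first).toNat - 1 := by omega
    have h2 : ((last - 1) - first).toNat = (last - first).toNat - 1 := by omega
    have h3 : 3 ^ (last - first).toNat = 3 ^ ((last - first).toNat - 1) * 3 := by
      rw [← pow_succ]; congr 1; omega
    have h4 := Nat.pow_pos (n := (last - first).toNat - 1) (show 0 < 3 by norm_num)
    rw [h1, h2, h3]
    omega

def recursive_line_creator_alt (data : List (String × List String)) (line : List (List (String × String))) (checked_stop : Int) (first_stop : Int) (last_stop : Int) : List (String × List String) :=
  pvLoop line checked_stop data [(first_stop, last_stop)]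

-- ===== PRECONDITION & SPEC =====
-- every index of line in [a, b] is in Python range (negative wraps) and the entry has a "name" key
def pvLineNamed (line : List (List (String × String))) (a b : Int) : Prop :=
  -(line.length : Int) ≤ a ∧ b < (line.length : Int) ∧
  ∀ p ∈ line.zipIdx,
    ((a ≤ (p.2 : Int) ∧ (p.2 : Int) ≤ b) ∨
     (a ≤ (p.2 : Int) - line.length ∧ (p.2 : Int) - line.length ≤ b)) →
    (PySem.Dict.get? (PySem.Dict.mk p.1) "name").isSome = true

-- Pre_ is exactly where the Python A returns: first_stop ≤ last_stop (otherwise the recursion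
-- never terminates), and whenever some pair appends (first_stop < last_stop and
-- first_stop ≤ checked_stop): every data value under a key other than Fra/Til/Sjekket? is
-- nonempty (value[0] is read), and — only if the corresponding key is present in data — the
-- line indices read for "Fra" (the [first_stop, min(checked_stop, last_stop-1)] window) resp.
-- "Til" (the [first_stop+1, last_stop] window) are in range with a "name" key.
def Pre_recursive_line_creator (data : List (String × List String)) (line : List (List (String × String))) (checked_stop : Int) (first_stop : Int) (last_stop : Int) : Prop :=
  first_stop ≤ last_stop ∧
  (first_stop < last_stop ∧ first_stop ≤ checked_stop →
    (∀ p ∈ data, ¬(p.1 = "Fra" ∨ p.1 = "Til" ∨ p.1 = "Sjekket?") → p.2 ≠ []) ∧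
    ((∃ p ∈ data, p.1 = "Fra") →
      pvLineNamed line first_stop (min checked_stop (last_stop - 1))) ∧
    ((∃ p ∈ data, p.1 = "Til") → pvLineNamed line (first_stop + 1) last_stop))
instance (data : List (String × List String)) (line : List (List (String × String))) (checked_stop : Int) (first_stop : Int) (last_stop : Int) : Decidable (Pre_recursive_line_creator data line checked_stop first_stop last_stop) := by unfold Pre_recursive_line_creator pvLineNamed; infer_instance

def pvWitness_recursive_line_creator : (List (String × List String)) × (List (List (String × String))) × Int × Int × Int :=
  ([("Fra", []), ("Til", []), ("Sjekket?", []), ("Pris", ["10"])],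
   [[("name", "A")], [("name", "B")], [("name", "C")]], 1, 0, 2)

def Spec_recursive_line_creator (data : List (String × List String)) (line : List (List (String × String))) (checked_stop : Int) (first_stop : Int) (last_stop : Int) (out : List (String × List String)) : Prop := out = recursive_line_creator_alt data line checked_stop first_stop last_stop
instance (data : List (String × List String)) (line : List (List (String × String))) (checked_stop : Int) (first_stop : Int) (last_stop : Int) (out : List (String × List String)) : Decidable (Spec_recursive_line_creator data line checked_stop first_stop last_stop out) := by unfold Spec_recursive_line_creator; infer_instance

-- ===== CLAIM (what is proved, stated in full; the proofs are below) =====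
def Claim_equal_recursive_line_creator : Prop := ∀ (data : List (String × List String)) (line : List (List (String × String))) (checked_stop : Int) (first_stop : Int) (last_stop : Int), Dom_recursive_line_creator data line checked_stop first_stop last_stop → Pre_recursive_line_creator data line checked_stop first_stop last_stop → Spec_recursive_line_creator data line checked_stop first_stop last_stop (recursive_line_creator data line checked_stop first_stop last_stop)

-- ===== LEMMAS AND PROOFS =====
-- Invariant of the worklist: processing the top pair (f, l) completely equals running A's
-- recursion on it and continuing with the rest of the stack.
lemma pvLoop_cons (line : List (List (String × String))) (checked_stop : Int) :
    ∀ (n : Nat) (f l : Int), (l - f).toNat ≤ n → ∀ (rest : List (Int × Int)) (data : List (String × List String)),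
      pvLoop line checked_stop data ((f, l) :: rest) =
        pvLoop line checked_stop (recursive_line_creator data line checked_stop f l) rest := by
  intro n
  induction n with
  | zero =>
    intro f l h rest data
    rcases eq_or_lt_of_le (show l ≤ f by omega) with hfl | hlf
    · rw [pvLoop.eq_2, if_pos hfl.symm, recursive_line_creator.eq_def, if_pos hfl.symm]
    · rw [pvLoop.eq_2, if_neg (by omega : ¬ f = l), if_pos hlf,
        recursive_line_creator.eq_def, if_neg (by omega : ¬ f = l), if_pos hlf]
  | succ n ih =>
    intro f l h rest data
    by_cases hfl : f = l
    · rw [pvLoop.eq_2, if_pos hfl, recursive_line_creator.eq_def, if_pos hfl]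
    · by_cases hlf : l < f
      · rw [pvLoop.eq_2, if_neg hfl, if_pos hlf,
          recursive_line_creator.eq_def, if_neg hfl, if_pos hlf]
      · rw [pvLoop.eq_2, if_neg hfl, if_neg hlf,
          ih (f + 1) l (by omega) ((f, l - 1) :: rest) _,
          ih f (l - 1) (by omega) rest _]
        conv_rhs => rw [recursive_line_creator.eq_def]
        rw [if_neg hfl, if_neg hlf]

-- ===== VERDICT (by name: the statement is the Claim_ definition above) =====
theorem recursive_line_creator_spec : Claim_equal_recursive_line_creator := by
  intro data line checked_stop first_stop last_stop _ _
  unfold Spec_recursive_line_creator recursive_line_creator_alt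
  rw [pvLoop_cons line checked_stop (last_stop - first_stop).toNat first_stop last_stop le_rfl [] data,
    pvLoop.eq_1]
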